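-- pv_equiv track=rewrite | github.com/cnnrznn/leetcode | merge-2list-k/merge2k.py | merge2k
-- ===== SOURCE A (Python) =====
-- def merge2k(l1, l2, k):
--     result = []
--
--     while k > 0:
--         k = k - 1
--
--         if len(l1) == 0 and len(l2) == 0:
--             return result
--         elif len(l1) == 0:
--             result.append(l2[0])
--             l2 = l2[1:]
--         elif len(l2) == 0:
--             result.append(l1[0])
--             l1 = l1[1:]
--         else:
--             if l1[0] < l2[0]:
--                 result.append(l1[0])
--                 l1 = l1[1:]
--             else:
--                 result.append(l2[0])
--                 l2 = l2[1:]
--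
--     return result
-- ===== SOURCE B (Python) =====
-- def merge2k(l1, l2, k):
--     i = 0
--     j = 0
--     out = []
--     n1 = len(l1)
--     n2 = len(l2)
--     while len(out) < k and (i < n1 or j < n2):
--         if j >= n2 or (i < n1 and l1[i] < l2[j]):
--             out.append(l1[i])
--             i += 1
--         else:
--             out.append(l2[j])
--             j += 1
--     return out
-- ===== Notes on version B (the rewrite author's own statement) =====
-- stated objective: faster
-- what changed: Two-pointer merge over indices replaces A's repeated list slicing (l[1:] copies), so no per-step list copies are made.
import Mathlib
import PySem

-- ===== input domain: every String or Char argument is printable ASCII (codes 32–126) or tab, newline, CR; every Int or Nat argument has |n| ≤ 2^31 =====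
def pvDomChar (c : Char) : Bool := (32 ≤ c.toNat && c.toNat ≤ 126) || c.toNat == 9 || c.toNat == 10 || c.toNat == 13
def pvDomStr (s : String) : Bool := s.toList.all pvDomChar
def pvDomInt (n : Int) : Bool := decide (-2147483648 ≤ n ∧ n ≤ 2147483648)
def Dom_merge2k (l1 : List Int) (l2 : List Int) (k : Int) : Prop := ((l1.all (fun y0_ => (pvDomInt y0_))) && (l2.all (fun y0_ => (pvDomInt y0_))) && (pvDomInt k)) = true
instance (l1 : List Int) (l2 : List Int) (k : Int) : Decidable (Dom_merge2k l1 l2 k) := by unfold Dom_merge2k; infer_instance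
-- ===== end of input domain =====

-- B replaces A's slice-per-step merge (l[1:] copies) by a two-pointer index merge: faster (no per-step list copies); return values proved equal on all inputs.


-- ===== PORT A =====
-- A's while loop: pop the head of l1/l2 by slicing (drop 1), k counts down.
def merge2kGoA (l1 : List Int) (l2 : List Int) (k : Int) (result : List Int) : List Int :=
  if 0 < k then
    if l1.length = 0 ∧ l2.length = 0 then result
    else if l1.length = 0 then merge2kGoA l1 (l2.drop 1) (k - 1) (result ++ [l2.headI])
    else if l2.length = 0 then merge2kGoA (l1.drop 1) l2 (k - 1) (result ++ [l1.headI])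
    else if l1.headI < l2.headI then merge2kGoA (l1.drop 1) l2 (k - 1) (result ++ [l1.headI])
    else merge2kGoA l1 (l2.drop 1) (k - 1) (result ++ [l2.headI])
  else result
termination_by k.toNat
decreasing_by all_goals omega

def merge2k (l1 : List Int) (l2 : List Int) (k : Int) : List Int :=
  merge2kGoA l1 l2 k []

-- ===== PORT B =====
-- B's while loop over two indices i, j; no list is ever sliced.
def merge2kGoB (l1 : List Int) (l2 : List Int) (k : Int) (i j : Nat) (out : List Int) : List Int :=
  if (out.length : Int) < k ∧ (i < l1.length ∨ j < l2.length) then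
    if l2.length ≤ j ∨ (i < l1.length ∧ l1.getD i 0 < l2.getD j 0) then
      merge2kGoB l1 l2 k (i + 1) j (out ++ [l1.getD i 0])
    else
      merge2kGoB l1 l2 k i (j + 1) (out ++ [l2.getD j 0])
  else out
termination_by (k - out.length).toNat
decreasing_by all_goals (simp only [List.length_append, List.length_singleton]; omega)

def merge2k_alt (l1 : List Int) (l2 : List Int) (k : Int) : List Int :=
  merge2kGoB l1 l2 k 0 0 []

-- ===== PRECONDITION & SPEC =====
def Spec_merge2k (l1 : List Int) (l2 : List Int) (k : Int) (out : List Int) : Prop := out = merge2k_alt l1 l2 k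
instance (l1 : List Int) (l2 : List Int) (k : Int) (out : List Int) : Decidable (Spec_merge2k l1 l2 k out) := by unfold Spec_merge2k; infer_instance

-- ===== CLAIM (what is proved, stated in full; the proofs are below) =====
def Claim_equal_merge2k : Prop := ∀ (l1 : List Int) (l2 : List Int) (k : Int), Dom_merge2k l1 l2 k → Spec_merge2k l1 l2 k (merge2k l1 l2 k)

-- ===== LEMMAS AND PROOFS =====

-- Reference merge with a Nat fuel; both ports are proved equal to it.
def mref : Nat → List Int → List Int → List Int
  | 0, _, _ => []
  | _ + 1, [], [] => []
  | n + 1, [], b :: t2 => b :: mref n [] t2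
  | n + 1, a :: t1, [] => a :: mref n t1 []
  | n + 1, a :: t1, b :: t2 =>
      if a < b then a :: mref n t1 (b :: t2) else b :: mref n (a :: t1) t2

lemma goA_eq_mref : ∀ (n : Nat) (k : Int), k.toNat = n → ∀ (l1 l2 out : List Int),
    merge2kGoA l1 l2 k out = out ++ mref n l1 l2 := by
  intro n
  induction n with
  | zero =>
      intro k hk l1 l2 out
      rw [merge2kGoA]
      simp [mref, show ¬ 0 < k by omega]
  | succ m ih =>
      intro k hk l1 l2 out
      rw [merge2kGoA]
      have hpos : 0 < k := by omega
      have hk' : (k - 1).toNat = m := by omega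
      rcases l1 with _ | ⟨a, t1⟩ <;> rcases l2 with _ | ⟨b, t2⟩ <;>
        simp [hpos, mref]
      · exact ih _ hk' _ _ _ |>.trans (by simp)
      · exact ih _ hk' _ _ _ |>.trans (by simp)
      · split <;> simp [ih _ hk']

lemma goB_eq_mref : ∀ (n : Nat) (k : Int) (out : List Int), (k - out.length).toNat = n →
    ∀ (l1 l2 : List Int) (i j : Nat), i ≤ l1.length → j ≤ l2.length →
    merge2kGoB l1 l2 k i j out = out ++ mref n (l1.drop i) (l2.drop j) := by
  intro n
  induction n with
  | zero =>
      intro k out hk l1 l2 i j hi hj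
      rw [merge2kGoB, if_neg (by rintro ⟨h, _⟩; omega)]
      simp [mref]
  | succ m ih =>
      intro k out hk l1 l2 i j hi hj
      rw [merge2kGoB]
      have hlen : (out.length : Int) < k := by omega
      have hm : ∀ x : Int, (k - ((out ++ [x]).length : Int)).toNat = m := by
        intro x
        simp only [List.length_append, List.length_cons, List.length_nil]
        omega
      by_cases h1 : i < l1.length
      · by_cases h2 : j < l2.length
        · have d1 := List.drop_eq_getElem_cons h1
          have d2 := List.drop_eq_getElem_cons h2
          have g1 : l1.getD i 0 = l1[i] := List.getD_eq_getElem l1 0 h1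
          have g2 : l2.getD j 0 = l2[j] := List.getD_eq_getElem l2 0 h2
          by_cases hlt : l1[i] < l2[j]
          · rw [if_pos ⟨hlen, Or.inl h1⟩,
              if_pos (Or.inr ⟨h1, by rw [g1, g2]; exact hlt⟩),
              ih _ _ (hm _) _ _ _ _ (by omega) hj, g1, d1, d2]
            simp [mref, hlt]
          · have hcond : ¬ (l2.length ≤ j ∨ (i < l1.length ∧ l1.getD i 0 < l2.getD j 0)) := by
              rintro (h | ⟨_, hl⟩)
              · omega
              · rw [g1, g2] at hl; omega
            rw [if_pos ⟨hlen, Or.inl h1⟩, if_neg hcond,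
              ih _ _ (hm _) _ _ _ _ hi (by omega), g2, d1, d2]
            simp [mref, hlt]
        · have d1 := List.drop_eq_getElem_cons h1
          have g1 : l1.getD i 0 = l1[i] := List.getD_eq_getElem l1 0 h1
          have e2 : l2.drop j = [] := by rw [List.drop_eq_nil_iff]; omega
          rw [if_pos ⟨hlen, Or.inl h1⟩, if_pos (Or.inl (by omega)),
            ih _ _ (hm _) _ _ _ _ (by omega) hj, g1, d1, e2]
          simp [mref]
      · by_cases h2 : j < l2.length
        · have d2 := List.drop_eq_getElem_cons h2
          have g2 : l2.getD j 0 = l2[j] := List.getD_eq_getElem l2 0 h2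
          have e1 : l1.drop i = [] := by rw [List.drop_eq_nil_iff]; omega
          rw [if_pos ⟨hlen, Or.inr h2⟩,
            if_neg (by rintro (h | ⟨hl, _⟩) <;> omega),
            ih _ _ (hm _) _ _ _ _ hi (by omega), g2, d2, e1]
          simp [mref]
        · rw [if_neg (by rintro ⟨_, h | h⟩ <;> omega)]
          have e1 : l1.drop i = [] := by rw [List.drop_eq_nil_iff]; omega
          have e2 : l2.drop j = [] := by rw [List.drop_eq_nil_iff]; omega
          simp [e1, e2, mref]

-- ===== VERDICT (by name: the statement is the Claim_ definition above) =====
theorem merge2k_spec : Claim_equal_merge2k := by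
  intro l1 l2 k _
  unfold Spec_merge2k merge2k merge2k_alt
  rw [goA_eq_mref k.toNat k rfl,
      goB_eq_mref k.toNat k [] (by simp) l1 l2 0 0 (by omega) (by omega)]
  simp
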